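-- pv_equiv track=rewrite | github.com/GalaxyInfernoCodes/Advent_Of_Code_2024 | aoc_2024_day_5.py | check_printing_order
-- ===== SOURCE A (Python) =====
-- def check_printing_order(
--     sorting_instructions: dict[int, list[int]], printing_order: list[int]
-- ) -> bool:
--     for index, printing_entry in enumerate(printing_order):
--         if printing_entry in sorting_instructions:
--             if index > 0:
--                 previous_printing_entries = printing_order[:index]
--                 wrongly_ordered_entries = set(previous_printing_entries).intersection(
--                     set(sorting_instructions[printing_entry])
--                 )
--                 if len(wrongly_ordered_entries) > 0:
--                     return False
--     return True
-- ===== SOURCE B (Python) =====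
-- def check_printing_order(
--     sorting_instructions: dict[int, list[int]], printing_order: list[int]
-- ) -> bool:
--     position = {}
--     for i, v in enumerate(printing_order):
--         if v not in position:
--             position[v] = i
--     for i, entry in enumerate(printing_order):
--         rules = sorting_instructions.get(entry)
--         if rules is not None:
--             for y in rules:
--                 j = position.get(y)
--                 if j is not None and j < i:
--                     return False
--     return True
-- ===== Notes on version B (the rewrite author's own statement) =====
-- stated objective: alternative
-- what changed: Replaces A's per-index prefix slice + set intersection with a first-occurrence index table built once, then checks each rule value against that table.
import Mathlib
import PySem

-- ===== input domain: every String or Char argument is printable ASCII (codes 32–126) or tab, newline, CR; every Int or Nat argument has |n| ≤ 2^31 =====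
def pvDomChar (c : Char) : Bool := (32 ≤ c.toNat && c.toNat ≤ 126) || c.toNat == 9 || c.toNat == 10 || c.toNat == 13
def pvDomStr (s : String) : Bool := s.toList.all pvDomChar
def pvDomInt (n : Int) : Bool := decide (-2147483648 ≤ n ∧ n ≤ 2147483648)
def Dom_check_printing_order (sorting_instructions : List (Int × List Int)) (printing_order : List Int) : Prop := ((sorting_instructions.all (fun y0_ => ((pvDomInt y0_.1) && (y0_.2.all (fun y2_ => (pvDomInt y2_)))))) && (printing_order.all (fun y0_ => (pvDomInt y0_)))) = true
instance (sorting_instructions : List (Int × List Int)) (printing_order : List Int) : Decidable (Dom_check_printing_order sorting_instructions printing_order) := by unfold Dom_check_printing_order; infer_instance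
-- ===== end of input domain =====

-- B replaces A's per-index prefix slice + set intersection by a first-occurrence index
-- table built once, checking each rule value against that table (objective: alternative).

-- ===== PORT A =====
-- the for-loop over enumerate(printing_order) with early return False
def checkA_loop (si : PySem.Dict Int (List Int)) (printing_order : List Int) :
    List (Int × Int) → Bool
  | [] => true
  | (index, printing_entry) :: rest =>
    if si.contains printing_entry then
      if index > 0 then
        let previous_printing_entries := PySem.List.slice printing_order none (some index)
        let wrongly_ordered_entries :=
          PySem.Set.inter (PySem.Set.ofList previous_printing_entries)
            (PySem.Set.ofList ((si.get? printing_entry).getD []))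
        if PySem.Set.len wrongly_ordered_entries > 0 then false
        else checkA_loop si printing_order rest
      else checkA_loop si printing_order rest
    else checkA_loop si printing_order rest

def check_printing_order (sorting_instructions : List (Int × List Int)) (printing_order : List Int) : Bool :=
  checkA_loop (PySem.Dict.mk sorting_instructions) printing_order
    (PySem.List.enumerate printing_order 0)

-- ===== PORT B =====
-- first pass: position[v] = first index of v in printing_order
def buildPos (printing_order : List Int) : PySem.Dict Int Int :=
  (PySem.List.enumerate printing_order 0).foldl
    (fun d p => if d.contains p.2 then d else d.insert p.2 p.1) PySem.Dict.empty

-- second pass: for each entry with rules, return False on the first rule value seen earlier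
def checkB_loop (si : PySem.Dict Int (List Int)) (pos : PySem.Dict Int Int) :
    List (Int × Int) → Bool
  | [] => true
  | (i, entry) :: rest =>
    match si.get? entry with
    | some rules =>
      if rules.any (fun y =>
          match pos.get? y with
          | some j => decide (j < i)
          | none => false) then false
      else checkB_loop si pos rest
    | none => checkB_loop si pos rest

def check_printing_order_alt (sorting_instructions : List (Int × List Int)) (printing_order : List Int) : Bool :=
  checkB_loop (PySem.Dict.mk sorting_instructions) (buildPos printing_order)
    (PySem.List.enumerate printing_order 0)

-- ===== PRECONDITION & SPEC =====
def Spec_check_printing_order (sorting_instructions : List (Int × List Int)) (printing_order : List Int) (out : Bool) : Prop := out = check_printing_order_alt sorting_instructions printing_order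
instance (sorting_instructions : List (Int × List Int)) (printing_order : List Int) (out : Bool) : Decidable (Spec_check_printing_order sorting_instructions printing_order out) := by unfold Spec_check_printing_order; infer_instance

-- ===== CLAIM (what is proved, stated in full; the proofs are below) =====
def Claim_equal_check_printing_order : Prop := ∀ (sorting_instructions : List (Int × List Int)) (printing_order : List Int), Dom_check_printing_order sorting_instructions printing_order → Spec_check_printing_order sorting_instructions printing_order (check_printing_order sorting_instructions printing_order)

-- ===== LEMMAS AND PROOFS =====

theorem buildPos_go (y : Int) (xs : List Int) (s : Nat) (d : PySem.Dict Int Int) :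
    ((PySem.List.enumerate xs (s : Int)).foldl
      (fun d p => if d.contains p.2 then d else d.insert p.2 p.1) d).get? y
      = ((d.get? y).orElse (fun _ =>
          if y ∈ xs then some ((s + xs.idxOf y : Nat) : Int) else none)) := by
  induction xs generalizing s d with
  | nil =>
    simp only [PySem.List.enumerate_nil, List.foldl_nil, List.not_mem_nil, if_false]
    cases d.get? y <;> rfl
  | cons x xs ih =>
    rw [PySem.List.enumerate_cons]
    simp only [List.foldl_cons]
    have hc1 : ((s : Int)) + 1 = ((s + 1 : Nat) : Int) := by push_cast; ring
    rw [hc1, ih]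
    by_cases hyx : y = x
    · subst hyx
      by_cases hc : d.contains y
      · simp only [hc, if_true]
        cases hgy : d.get? y with
        | none =>
          exfalso
          rw [PySem.Dict.contains_eq_isSome_get?, hgy] at hc
          exact Bool.noConfusion hc
        | some v => simp [Option.orElse]
      · simp only [hc]
        have hnone : d.get? y = none :=
          (PySem.Dict.get?_eq_none_iff_contains d y).mpr (by simpa using hc)
        simp [PySem.Dict.get?_insert_self, hnone, Option.orElse, List.idxOf_cons_self]
    · have hne : y ≠ x := hyx
      have hstep : (if d.contains x then d else d.insert x (s : Int)).get? y = d.get? y := by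
        split
        · rfl
        · exact PySem.Dict.get?_insert_of_ne _ _ hne
      rw [hstep]
      have hidx : List.idxOf y (x :: xs) = List.idxOf y xs + 1 :=
        List.idxOf_cons_ne _ (by simpa using fun h => hyx h.symm)
      by_cases hmem : y ∈ xs
      · simp only [List.mem_cons, hyx, hmem, false_or, if_true, hidx]
        have harith : s + 1 + List.idxOf y xs = s + (List.idxOf y xs + 1) := by omega
        rw [harith]
      · simp [hmem, hne]

theorem buildPos_get (y : Int) (xs : List Int) :
    (buildPos xs).get? y = if y ∈ xs then some ((xs.idxOf y : Nat) : Int) else none := by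
  have := buildPos_go y xs 0 PySem.Dict.empty
  simpa [buildPos, Option.orElse] using this

theorem mem_take_iff_idxOf_lt (y : Int) (xs : List Int) (k : Nat) :
    y ∈ xs.take k ↔ y ∈ xs ∧ xs.idxOf y < k := by
  induction xs generalizing k with
  | nil => simp
  | cons x xs ih =>
    cases k with
    | zero => simp
    | succ k =>
      by_cases hyx : y = x
      · subst hyx; simp [List.idxOf_cons_self]
      · have hx : List.idxOf y (x :: xs) = List.idxOf y xs + 1 :=
          List.idxOf_cons_ne _ (by simpa using fun h => hyx h.symm)
        simp only [List.take_succ_cons, List.mem_cons, hyx, false_or, ih, hx]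
        constructor
        · rintro ⟨h1, h2⟩; exact ⟨h1, by omega⟩
        · rintro ⟨h1, h2⟩; exact ⟨h1, by omega⟩

-- the two per-element conditions agree
theorem cond_eq (pos_order : List Int) (rules : List Int) (k : Nat) :
    (decide (0 < (k : Int)) &&
      decide (0 < PySem.Set.len (PySem.Set.inter
        (PySem.Set.ofList (PySem.List.slice pos_order none (some (k : Int))))
        (PySem.Set.ofList rules))))
    = rules.any (fun y =>
        match (buildPos pos_order).get? y with
        | some j => decide (j < (k : Int))
        | none => false) := by
  rw [PySem.List.slice_to_natCast]
  rcases Nat.eq_zero_or_pos k with hk | hk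
  · subst hk
    simp only [Nat.cast_zero, lt_irrefl, decide_false, Bool.false_and]
    symm
    rw [List.any_eq_false]
    intro y _
    rw [buildPos_get]
    split
    · next j hj =>
      split at hj
      · cases hj
        simp
      · cases hj
    · simp
  · have h0 : (decide (0 < (k : Int))) = true := by simp [hk]
    rw [h0, Bool.true_and]
    rcases hcase : rules.any (fun y =>
        match (buildPos pos_order).get? y with
        | some j => decide (j < (k : Int))
        | none => false) with _ | _
    · -- any = false : intersection empty
      rw [List.any_eq_false] at hcase
      simp only [decide_eq_false_iff_not, not_lt]
      have hnil : PySem.Set.inter (PySem.Set.ofList (pos_order.take k))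
          (PySem.Set.ofList rules) = [] := by
        rw [List.eq_nil_iff_forall_not_mem]
        intro y hy
        have hy1 : y ∈ PySem.Set.ofList (pos_order.take k) :=
          (PySem.Set.mem_inter _ _ _).mp hy |>.1
        have hy2 : y ∈ rules := by
          have := (PySem.Set.mem_inter _ _ _).mp hy |>.2
          simpa [PySem.Set.mem_ofList] using this
        have hmem : y ∈ pos_order.take k := by
          simpa [PySem.Set.mem_ofList] using hy1
        have hfi := (mem_take_iff_idxOf_lt y pos_order k).mp hmem
        have hb := hcase y hy2
        rw [buildPos_get, if_pos hfi.1] at hb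
        have hb' : ¬ (decide (((pos_order.idxOf y : Nat) : Int) < ((k : Nat) : Int)) = true) := hb
        have hb'' : ¬ (((pos_order.idxOf y : Nat) : Int) < ((k : Nat) : Int)) :=
          fun h => hb' (decide_eq_true h)
        have := hfi.2
        omega
      rw [hnil]
      simp [PySem.Set.len]
    · rw [List.any_eq_true] at hcase
      rcases hcase with ⟨y, hyr, hy⟩
      rw [buildPos_get] at hy
      by_cases hmem : y ∈ pos_order
      · simp only [hmem, if_true] at hy
        have hlt : pos_order.idxOf y < k := by
          simp at hy; omega
        have hin : y ∈ pos_order.take k :=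
          (mem_take_iff_idxOf_lt y pos_order k).mpr ⟨hmem, hlt⟩
        have : y ∈ PySem.Set.inter (PySem.Set.ofList (pos_order.take k))
            (PySem.Set.ofList rules) := by
          rw [PySem.Set.mem_inter]
          constructor
          · simpa [PySem.Set.mem_ofList] using hin
          · simpa [PySem.Set.mem_ofList] using hyr
        rw [PySem.Set.len]
        simp only [decide_eq_true_eq]
        exact_mod_cast List.length_pos_iff.mpr (List.ne_nil_of_mem this)
      · rw [if_neg hmem] at hy
        exact Bool.noConfusion hy
  
theorem loops_eq (si : PySem.Dict Int (List Int)) (pos_order : List Int)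
    (l : List (Int × Int))
    (hl : ∀ p ∈ l, ∃ k : Nat, p.1 = (k : Int)) :
    checkA_loop si pos_order l = checkB_loop si (buildPos pos_order) l := by
  induction l with
  | nil => rfl
  | cons p rest ih =>
    obtain ⟨k, hk⟩ := hl p (List.mem_cons_self ..)
    obtain ⟨i, entry⟩ := p
    simp only at hk
    subst hk
    have ihr := ih (fun q hq => hl q (List.mem_cons_of_mem _ hq))
    rcases hget : si.get? entry with _ | rules
    · have hc : si.contains entry = false := by
        rw [PySem.Dict.contains_eq_isSome_get?, hget]; rfl
      simp [checkA_loop, checkB_loop, hc, hget, ihr]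
    · have hc : si.contains entry = true := by
        rw [PySem.Dict.contains_eq_isSome_get?, hget]; rfl
      have hcond := cond_eq pos_order rules k
      have hA : checkA_loop si pos_order (((k : Nat), entry) :: rest)
          = if (decide (0 < ((k : Nat) : Int)) &&
              decide (0 < PySem.Set.len (PySem.Set.inter
                (PySem.Set.ofList (PySem.List.slice pos_order none (some ((k : Nat) : Int))))
                (PySem.Set.ofList rules)))) = true
            then false else checkA_loop si pos_order rest := by
        simp only [checkA_loop, hc, if_true, hget, Option.getD_some, gt_iff_lt]
        by_cases h0 : (0 : Int) < ((k : Nat) : Int)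
        · by_cases h1 : (0 : Int) < PySem.Set.len (PySem.Set.inter
              (PySem.Set.ofList (PySem.List.slice pos_order none (some ((k : Nat) : Int))))
              (PySem.Set.ofList rules))
          · rw [if_pos h0, if_pos h1,
              if_pos (by rw [Bool.and_eq_true]; exact ⟨decide_eq_true h0, decide_eq_true h1⟩)]
          · rw [if_pos h0, if_neg h1,
              if_neg (by rw [Bool.and_eq_true]; rintro ⟨-, h⟩; exact h1 (of_decide_eq_true h))]
        · rw [if_neg h0,
            if_neg (by rw [Bool.and_eq_true]; rintro ⟨h, -⟩; exact h0 (of_decide_eq_true h))]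
      have hB : checkB_loop si (buildPos pos_order) (((k : Nat), entry) :: rest)
          = if (rules.any (fun y =>
              match (buildPos pos_order).get? y with
              | some j => decide (j < ((k : Nat) : Int))
              | none => false)) = true
            then false else checkB_loop si (buildPos pos_order) rest := by
        simp only [checkB_loop, hget]
      rw [hA, hB, hcond, ihr]

-- ===== VERDICT (by name: the statement is the Claim_ definition above) =====
theorem check_printing_order_spec : Claim_equal_check_printing_order := by
  intro si po _
  unfold Spec_check_printing_order check_printing_order check_printing_order_alt
  apply loops_eq
  intro p hp
  rw [PySem.List.mem_enumerate_iff] at hp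
  obtain ⟨k, hk, rfl⟩ := hp
  exact ⟨k, by simp⟩
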